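-- pv_equiv track=rewrite | github.com/isilionisilme/veterinary-medical-records-handoff | backend/tests/unit/test_requirements_pinning_guard.py | _is_allowed_option_line
-- ===== SOURCE A (Python) =====
-- ALLOWED_OPTION_PREFIXES = (
--     "--index-url",
--     "--extra-index-url",
--     "--trusted-host",
--     "--find-links",
--     "--no-binary",
--     "--only-binary",
-- )
--
-- def _is_allowed_option_line(line: str) -> bool:
--     lowered = line.lower()
--     for prefix in ALLOWED_OPTION_PREFIXES:
--         if (
--             lowered == prefix
--             or lowered.startswith(prefix + " ")
--             or lowered.startswith(prefix + "=")
--         ):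
--             return True
--     return False
-- ===== SOURCE B (Python) =====
-- ALLOWED_OPTION_PREFIXES = (
--     "--index-url",
--     "--extra-index-url",
--     "--trusted-host",
--     "--find-links",
--     "--no-binary",
--     "--only-binary",
-- )
--
-- _ALLOWED_SET = frozenset(ALLOWED_OPTION_PREFIXES)
--
--
-- def _is_allowed_option_line(line: str) -> bool:
--     lowered = line.lower()
--     head = lowered.split(" ", 1)[0].split("=", 1)[0]
--     return head in _ALLOWED_SET
-- ===== Notes on version B (the rewrite author's own statement) =====
-- stated objective: idiomatic
-- what changed: Instead of scanning the prefix tuple with three startswith/equality tests per prefix, B extracts the leading token (up to the first space or '=') once and does a single frozenset membership test.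
import Mathlib
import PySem

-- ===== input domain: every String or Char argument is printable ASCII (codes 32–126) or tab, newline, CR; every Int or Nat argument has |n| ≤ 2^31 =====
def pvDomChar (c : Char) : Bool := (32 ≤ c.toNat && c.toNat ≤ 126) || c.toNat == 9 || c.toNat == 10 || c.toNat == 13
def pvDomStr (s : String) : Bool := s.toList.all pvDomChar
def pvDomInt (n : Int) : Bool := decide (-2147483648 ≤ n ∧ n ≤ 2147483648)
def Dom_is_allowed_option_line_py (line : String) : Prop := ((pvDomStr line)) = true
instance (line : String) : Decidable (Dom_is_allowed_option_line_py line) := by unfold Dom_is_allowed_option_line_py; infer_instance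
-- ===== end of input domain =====

-- B replaces A's loop of per-prefix startswith tests by one leading-token extraction plus a single set membership (idiomatic; same behaviour).

-- ===== PORT A =====
-- ALLOWED_OPTION_PREFIXES (module constant), as lists of chars
def pvPrefixes : List (List Char) :=
  [ "--index-url".toList, "--extra-index-url".toList, "--trusted-host".toList,
    "--find-links".toList, "--no-binary".toList, "--only-binary".toList ]

def is_allowed_option_line_py (line : String) : Bool :=
  let lowered := PySem.Chars.lower line.toList
  -- 'for prefix in …: if …: return True' / 'return False' = any over the tuple, same tests in order
  pvPrefixes.any (fun p =>
    lowered == p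
    || PySem.Chars.startswith lowered (p ++ [' '])
    || PySem.Chars.startswith lowered (p ++ ['=']))

-- ===== PORT B =====
-- _ALLOWED_SET = frozenset(ALLOWED_OPTION_PREFIXES): same members as pvPrefixes (all distinct), membership test
-- s.split(d, 1)[0] is exactly the prefix of s before the first occurrence of d, i.e. takeWhile (· ≠ d)
def is_allowed_option_line_py_alt (line : String) : Bool :=
  let lowered := PySem.Chars.lower line.toList
  let head := (lowered.takeWhile (fun c => c != ' ')).takeWhile (fun c => c != '=')
  pvPrefixes.contains head

-- ===== PRECONDITION & SPEC =====
def Spec_is_allowed_option_line_py (line : String) (out : Bool) : Prop := out = is_allowed_option_line_py_alt line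
instance (line : String) (out : Bool) : Decidable (Spec_is_allowed_option_line_py line out) := by unfold Spec_is_allowed_option_line_py; infer_instance

-- ===== CLAIM (what is proved, stated in full; the proofs are below) =====
def Claim_equal_is_allowed_option_line_py : Prop := ∀ (line : String), Dom_is_allowed_option_line_py line → Spec_is_allowed_option_line_py line (is_allowed_option_line_py line)

-- ===== LEMMAS AND PROOFS =====

-- the head-extraction of B, as one predicate
def pvHead (l : List Char) : List Char :=
  (l.takeWhile (fun c => c != ' ')).takeWhile (fun c => c != '=')

lemma pvHead_nil : pvHead [] = [] := rfl

lemma pvHead_cons (c : Char) (t : List Char) :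
    pvHead (c :: t) = if c = ' ' ∨ c = '=' then [] else c :: pvHead t := by
  by_cases hs : c = ' '
  · simp [pvHead, hs]
  · by_cases he : c = '='
    · simp [pvHead, he]
    · simp [pvHead, hs, he]

-- For a delimiter-free prefix p, B's head equals p exactly when A's three tests accept p.
lemma head_eq_iff (p : List Char) (hp : ∀ c ∈ p, c ≠ ' ' ∧ c ≠ '=') (l : List Char) :
    pvHead l = p ↔ (l = p ∨ (p ++ [' ']) <+: l ∨ (p ++ ['=']) <+: l) := by
  induction p generalizing l with
  | nil =>
    cases l with
    | nil => simp [pvHead_nil]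
    | cons c t =>
      rw [pvHead_cons]
      by_cases h : c = ' ' ∨ c = '='
      · rcases h with h | h <;> simp [h, List.cons_prefix_cons]
      · push Not at h
        simp [h.1, h.2, List.cons_prefix_cons]
        exact ⟨fun hc => h.1 hc.symm, fun hc => h.2 hc.symm⟩
  | cons a p' ih =>
    have ha := hp a (List.mem_cons_self ..)
    cases l with
    | nil => simp [pvHead_nil, List.prefix_nil]
    | cons c t =>
      rw [pvHead_cons]
      by_cases h : c = ' ' ∨ c = '='
      · rw [if_pos h]
        rcases h with h | h <;>
          · subst h
            simp only [List.cons_append, List.cons_prefix_cons, List.cons.injEq]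
            constructor
            · intro he; exact absurd he.symm (by simp)
            · rintro (⟨hc, -⟩ | ⟨hc, -⟩ | ⟨hc, -⟩) <;>
                first
                  | exact absurd hc.symm ha.1
                  | exact absurd hc.symm ha.2
                  | exact absurd hc ha.1
                  | exact absurd hc ha.2
      · push Not at h
        rw [if_neg (by tauto)]
        have ih' := ih (fun c hc => hp c (List.mem_cons_of_mem _ hc)) t
        simp only [List.cons.injEq, List.cons_append, List.cons_prefix_cons, ih']
        constructor
        · rintro ⟨hc, hrest⟩
          rcases hrest with h1 | h1 | h1
          · exact Or.inl ⟨hc, h1⟩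
          · exact Or.inr (Or.inl ⟨hc.symm, h1⟩)
          · exact Or.inr (Or.inr ⟨hc.symm, h1⟩)
        · rintro (⟨hc, h1⟩ | ⟨hc, h1⟩ | ⟨hc, h1⟩)
          · exact ⟨hc, Or.inl h1⟩
          · exact ⟨hc.symm, Or.inr (Or.inl h1)⟩
          · exact ⟨hc.symm, Or.inr (Or.inr h1)⟩

-- ===== VERDICT (by name: the statement is the Claim_ definition above) =====
theorem is_allowed_option_line_py_spec : Claim_equal_is_allowed_option_line_py := by
  intro line _
  unfold Spec_is_allowed_option_line_py is_allowed_option_line_py is_allowed_option_line_py_alt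
  rw [Bool.eq_iff_iff]
  show _ ↔ pvPrefixes.contains (pvHead (PySem.Chars.lower line.toList)) = true
  rw [List.contains_iff_mem]
  simp only [List.any_eq_true, Bool.or_eq_true, beq_iff_eq, PySem.Chars.startswith_iff]
  constructor
  · rintro ⟨p, hp, hcond⟩
    have hcl : ∀ c ∈ p, c ≠ ' ' ∧ c ≠ '=' := by
      simp only [pvPrefixes, List.mem_cons, List.not_mem_nil, or_false] at hp
      rcases hp with h | h | h | h | h | h <;> subst h <;> simp
    have : pvHead (PySem.Chars.lower line.toList) = p := by
      rw [head_eq_iff p hcl]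
      rcases hcond with h | h
      · rcases h with h | h
        · exact Or.inl h
        · exact Or.inr (Or.inl h)
      · exact Or.inr (Or.inr h)
    rw [this]; exact hp
  · intro hmem
    refine ⟨pvHead (PySem.Chars.lower line.toList), hmem, ?_⟩
    have hcl : ∀ c ∈ pvHead (PySem.Chars.lower line.toList), c ≠ ' ' ∧ c ≠ '=' := by
      simp only [pvPrefixes, List.mem_cons, List.not_mem_nil, or_false] at hmem
      rcases hmem with h | h | h | h | h | h <;> rw [h] <;> simp
    rcases (head_eq_iff _ hcl _).mp rfl with h | h | h
    · exact Or.inl (Or.inl h)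
    · exact Or.inl (Or.inr h)
    · exact Or.inr h
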